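-- pv_equiv track=rewrite | github.com/chiilee/python_for_flac | function_DataProcess.py | count_every_timestep
-- ===== SOURCE A (Python) =====
-- def count_every_timestep(count_time_array,time_array):
-- #count_time_array= time-array of every markers in ranges
--     count=[0]              #number was made in every time step
--     for kk1 in range(0,len(time_array)-1):
--         count.append(0)
--         for kk2 in range(len(count_time_array)):
--             if time_array[kk1]==count_time_array[kk2] and count_time_array[kk2]!=0:
--                 count[kk1]=count[kk1]+1
--     return count
-- ===== SOURCE B (Python) =====
-- def count_every_timestep(count_time_array, time_array):
--     # Inverted index: each time value -> list of all its timestep positions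
--     # (last slot excluded); then scatter-add over the marker array.
--     index = {}
--     for p, t in enumerate(time_array[:-1]):
--         index.setdefault(t, []).append(p)
--     count = [0] * max(len(time_array), 1)
--     for v in count_time_array:
--         if v != 0 and v in index:
--             for p in index[v]:
--                 count[p] += 1
--     return count
-- ===== Notes on version B (the rewrite author's own statement) =====
-- stated objective: faster
-- what changed: Reverses the traversal: instead of scanning the whole marker array once per timestep, B builds an inverted index from each time value to the list of its positions and makes a single scatter-add pass over the marker array.
import Mathlib
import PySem

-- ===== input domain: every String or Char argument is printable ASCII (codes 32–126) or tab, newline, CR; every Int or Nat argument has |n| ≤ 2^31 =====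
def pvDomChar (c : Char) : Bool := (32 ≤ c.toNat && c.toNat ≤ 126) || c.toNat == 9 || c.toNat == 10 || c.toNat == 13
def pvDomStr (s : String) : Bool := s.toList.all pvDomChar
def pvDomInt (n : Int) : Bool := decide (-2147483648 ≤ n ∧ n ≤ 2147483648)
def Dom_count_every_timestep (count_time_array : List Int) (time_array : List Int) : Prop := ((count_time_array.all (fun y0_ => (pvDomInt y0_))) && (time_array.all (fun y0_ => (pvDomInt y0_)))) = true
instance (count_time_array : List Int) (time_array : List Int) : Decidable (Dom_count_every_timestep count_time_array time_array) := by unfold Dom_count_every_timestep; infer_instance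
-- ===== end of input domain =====

-- B reverses the traversal: an inverted index from each time value to its positions,
-- then one scatter-add pass over the marker array (faster).

-- ===== PORT A =====
-- for kk1 in range(0, len(time_array)-1): append 0; inner loop over count_time_array
-- incrementing count[kk1] when the times match and are nonzero.  All indexing is in
-- range, so getD/set are exact.
def count_every_timestep (count_time_array : List Int) (time_array : List Int) : List Int :=
  (List.range (time_array.length - 1)).foldl (fun count kk1 =>
    let count := count ++ [0]
    count_time_array.foldl (fun c v =>
      if time_array.getD kk1 0 = v ∧ v ≠ 0 then
        c.set kk1 (c.getD kk1 0 + 1)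
      else c) count) [0]

-- ===== PORT B =====
-- index = {}; for p, t in enumerate(time_array[:-1]): index.setdefault(t, []).append(p)
-- count = [0] * max(len(time_array), 1)
-- for v in count_time_array: if v != 0 and v in index: for p in index[v]: count[p] += 1
-- (every position p is a nonnegative in-range index, so pySetD/pyGetD are exact)
def count_every_timestep_alt (count_time_array : List Int) (time_array : List Int) : List Int :=
  let index := (PySem.List.enumerate (PySem.List.slice time_array none (some (-1)))).foldl
    (fun d pt => d.modify pt.2 ([] : List Int) (· ++ [pt.1])) PySem.Dict.empty
  let count := List.replicate (max time_array.length 1) (0 : Int)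
  count_time_array.foldl (fun c v =>
    if v ≠ 0 ∧ index.contains v then
      (index.getD v []).foldl (fun c p =>
        PySem.List.pySetD c p (PySem.List.pyGetD c p 0 + 1)) c
    else c) count

-- ===== PRECONDITION & SPEC =====
def Spec_count_every_timestep (count_time_array : List Int) (time_array : List Int) (out : List Int) : Prop := out = count_every_timestep_alt count_time_array time_array
instance (count_time_array : List Int) (time_array : List Int) (out : List Int) : Decidable (Spec_count_every_timestep count_time_array time_array out) := by unfold Spec_count_every_timestep; infer_instance

-- ===== CLAIM (what is proved, stated in full; the proofs are below) =====
def Claim_equal_count_every_timestep : Prop := ∀ (count_time_array : List Int) (time_array : List Int), Dom_count_every_timestep count_time_array time_array → Spec_count_every_timestep count_time_array time_array (count_every_timestep count_time_array time_array)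

-- ===== LEMMAS AND PROOFS =====

-- the value both sides compute for timestep i
def pvG (cta ta : List Int) (i : Nat) : Int :=
  if ta.getD i 0 = 0 then 0 else (cta.count (ta.getD i 0) : Int)

-- counting the nonzero matches of t is pvG
theorem pv_countP_pvG (cta : List Int) (t : Int) :
    (cta.countP (fun v => decide (t = v ∧ v ≠ 0)) : Int)
    = if t = 0 then 0 else (cta.count t : Int) := by
  by_cases ht : t = 0
  · rw [if_pos ht]
    simp only [Nat.cast_eq_zero, List.countP_eq_zero]
    intro v hv
    rw [ht]
    simp only [decide_eq_true_eq, not_and, ne_eq, not_not]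
    intro h0; omega
  · rw [if_neg ht]
    congr 1
    rw [List.count_eq_countP]
    apply List.countP_congr
    intro v hv
    constructor
    · intro hx; simp at hx ⊢; omega
    · intro hx
      simp at hx ⊢
      exact ⟨by omega, fun hv0 => ht (hv0 ▸ hx.symm)⟩

-- ---------- A-side characterisation ----------

theorem pv_getD_set (l : List Int) (i : Nat) (h : i < l.length) (v : Int) :
    (l.set i v).getD i 0 = v := by
  rw [List.getD_eq_getElem _ _ (by simpa using h)]
  exact List.getElem_set_self (by simpa using h)

theorem pv_set_getD_self (l : List Int) (i : Nat) (h : i < l.length) :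
    l.set i (l.getD i 0) = l := by
  rw [List.getD_eq_getElem _ _ h]
  exact List.set_getElem_self h

-- A's inner loop adds the match count at slot kk1
theorem pv_inner (t : Int) (cta : List Int) : ∀ (count : List Int) (kk1 : Nat),
    kk1 < count.length →
    cta.foldl (fun c v => if t = v ∧ v ≠ 0 then c.set kk1 (c.getD kk1 0 + 1) else c) count
    = count.set kk1 (count.getD kk1 0 +
        (cta.countP (fun v => decide (t = v ∧ v ≠ 0)) : Int)) := by
  induction cta with
  | nil =>
    intro count kk1 h
    simp only [List.foldl_nil, List.countP_nil, Nat.cast_zero, add_zero]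
    exact (pv_set_getD_self _ _ h).symm
  | cons v vs ih =>
    intro count kk1 h
    simp only [List.foldl_cons, List.countP_cons]
    by_cases hv : t = v ∧ v ≠ 0
    · rw [if_pos hv, ih _ kk1 (by simpa using h), pv_getD_set _ _ h, List.set_set]
      congr 1
      have hd : (decide (t = v ∧ v ≠ 0)) = true := by simp [hv]
      rw [hd]
      push_cast
      rw [if_pos rfl]
      ring
    · rw [if_neg hv, ih _ kk1 h]
      have : (decide (t = v ∧ v ≠ 0)) = false := by simpa using hv
      rw [this]
      simp

theorem pv_set_append_len (l : List Int) (m : Nat) (hm : m = l.length) (x y v : Int) :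
    (l ++ [x, y]).set m v = l ++ [v, y] := by
  subst hm
  induction l with
  | nil => rfl
  | cons a l ih => simp

theorem pv_getD_append_len (l : List Int) (m : Nat) (hm : m = l.length) (x y : Int) :
    (l ++ [x, y]).getD m 0 = x := by
  subst hm
  induction l with
  | nil => rfl
  | cons a l ih => simp

-- A's outer loop builds the map of pvG, with a trailing 0
theorem pv_outer (cta ta : List Int) (m : Nat) :
    (List.range m).foldl (fun count kk1 =>
      let count := count ++ [0]
      cta.foldl (fun c v =>
        if ta.getD kk1 0 = v ∧ v ≠ 0 then c.set kk1 (c.getD kk1 0 + 1) else c) count) [0]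
    = (List.range m).map (pvG cta ta) ++ [0] := by
  induction m with
  | zero => rfl
  | succ m ih =>
    rw [List.range_succ, List.foldl_append, ih, List.map_append]
    simp only [List.foldl_cons, List.foldl_nil]
    have hlen : m < ((List.range m).map (pvG cta ta) ++ [0] ++ [(0:Int)]).length := by
      simp
    rw [pv_inner _ _ _ _ hlen]
    have happ : (List.range m).map (pvG cta ta) ++ [0] ++ [(0:Int)]
        = (List.range m).map (pvG cta ta) ++ [(0:Int), 0] := by simp
    have hm : m = ((List.range m).map (pvG cta ta)).length := by simp
    rw [happ, pv_getD_append_len _ _ hm, pv_set_append_len _ _ hm]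
    have hcount : (cta.countP (fun v => decide (ta.getD m 0 = v ∧ v ≠ 0)) : Int)
        = pvG cta ta m := by
      rw [pv_countP_pvG]
      rfl
    rw [hcount]
    simp

-- ---------- B-side characterisation ----------

-- the inverted index looks up exactly the enumerated positions of a value
theorem pv_index_getD (dl : List Int) (v : Int) :
    (((PySem.List.enumerate dl).foldl
        (fun d pt => d.modify pt.2 ([] : List Int) (· ++ [pt.1]))
        PySem.Dict.empty).getD v [])
    = (((PySem.List.enumerate dl).filter (fun pt => pt.2 == v)).map (·.1)) := by
  have h : (PySem.List.enumerate dl).foldl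
        (fun d pt => d.modify pt.2 ([] : List Int) (· ++ [pt.1]))
        (PySem.Dict.empty : PySem.Dict Int (List Int))
      = ((PySem.List.enumerate dl).map Prod.swap).foldl
        (fun d p => d.modify p.1 ([] : List Int) (· ++ [p.2])) PySem.Dict.empty := by
    rw [List.foldl_map]
    rfl
  rw [h, PySem.Dict.getD_foldl_modify_append, List.filter_map, List.map_map]
  simp [Function.comp_def, Prod.swap]

-- multiplicity of a position in the enumerated-filter list
theorem pv_enum_count (v : Int) (dl : List Int) : ∀ (s i : Int),
    ((((PySem.List.enumerate dl s).filter (fun pt => pt.2 == v)).map (·.1)).count i)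
    = (if s ≤ i ∧ i < s + dl.length ∧ dl.getD (i - s).toNat 0 = v then 1 else 0) := by
  induction dl with
  | nil => intro s i; simp [PySem.List.enumerate_nil]; omega
  | cons x xs ih =>
    intro s i
    rw [PySem.List.enumerate_cons, List.filter_cons]
    have hR := ih (s+1) i
    have hgetD : s + 1 ≤ i → (x :: xs).getD (i - s).toNat 0 = xs.getD (i - (s+1)).toNat 0 := by
      intro h
      have : (i - s).toNat = (i - (s+1)).toNat + 1 := by omega
      simp [this]
    have hshift : i ≠ s →
        ((s ≤ i ∧ i < s + ((x :: xs).length : Int) ∧ (x :: xs).getD (i - s).toNat 0 = v)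
          ↔ (s + 1 ≤ i ∧ i < s + 1 + (xs.length : Int) ∧ xs.getD (i - (s+1)).toNat 0 = v)) := by
      intro hi
      constructor
      · rintro ⟨h1, h2, h3⟩
        have h1' : s + 1 ≤ i := by omega
        exact ⟨h1', by simp at h2 ⊢; omega, by rw [← hgetD h1']; exact h3⟩
      · rintro ⟨h1, h2, h3⟩
        exact ⟨by omega, by simp; omega, by rw [hgetD h1]; exact h3⟩
    by_cases hx : (x == v) = true
    · rw [if_pos hx, List.map_cons, List.count_cons, hR]
      by_cases hi : i = s
      · subst hi
        have h3 : (x :: xs).getD ((i - i).toNat) 0 = v := by simpa using (eq_of_beq hx)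
        have hc : i ≤ i ∧ i < i + ((x :: xs).length : Int) ∧ (x :: xs).getD (i - i).toNat 0 = v :=
          ⟨le_refl _, by simp, h3⟩
        rw [if_pos hc, if_neg (fun h => absurd h.1 (by omega))]
        simp
      · have hne : (s == i) = false := by simpa using (Ne.symm hi)
        rw [hne, if_congr (hshift hi) rfl rfl]
        simp
    · rw [if_neg hx, hR]
      by_cases hi : i = s
      · subst hi
        rw [if_neg (fun h => absurd h.1 (by omega)), if_neg]
        rintro ⟨h1, h2, h3⟩
        have : (i - i).toNat = 0 := by omega
        rw [this] at h3
        simp at h3 hx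
        exact hx h3
      · rw [if_congr (hshift hi) rfl rfl]

-- inner scatter loop: adds the multiplicity of each position
theorem pv_scatter_inner (ps : List Int) : ∀ (c : List Int),
    (∀ p ∈ ps, 0 ≤ p ∧ p < (c.length : Int)) →
    (ps.foldl (fun c p => PySem.List.pySetD c p (PySem.List.pyGetD c p 0 + 1)) c).length
      = c.length
    ∧ ∀ i : Nat,
      (ps.foldl (fun c p => PySem.List.pySetD c p (PySem.List.pyGetD c p 0 + 1)) c).getD i 0
      = c.getD i 0 + (ps.count (i : Int) : Int) := by
  induction ps with
  | nil => intro c hb; simp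
  | cons p ps ih =>
    intro c hb
    obtain ⟨hp0, hpl⟩ := hb p (List.mem_cons_self)
    have hpn : p = ((p.toNat : Nat) : Int) := by omega
    have hstep : PySem.List.pySetD c p (PySem.List.pyGetD c p 0 + 1)
        = c.set p.toNat (c.getD p.toNat 0 + 1) := by
      rw [hpn, PySem.List.pySetD_natCast, PySem.List.pyGetD_natCast]
      simp only [Int.toNat_natCast]
    rw [List.foldl_cons, hstep]
    have hlen : (c.set p.toNat (c.getD p.toNat 0 + 1)).length = c.length := by simp
    have hb' : ∀ q ∈ ps, 0 ≤ q ∧ q < ((c.set p.toNat (c.getD p.toNat 0 + 1)).length : Int) := by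
      intro q hq; rw [hlen]; exact hb q (List.mem_cons_of_mem _ hq)
    obtain ⟨ihl, ihg⟩ := ih _ hb'
    refine ⟨by rw [ihl, hlen], ?_⟩
    intro i
    rw [ihg i]
    have hplt : p.toNat < c.length := by omega
    by_cases hi : i = p.toNat
    · subst hi
      rw [List.getD_eq_getElem _ _ (by simpa using hplt),
        List.getElem_set_self (by simpa using hplt),
        List.getD_eq_getElem _ _ hplt, List.count_cons]
      have hbeq : (p == ((p.toNat : Nat) : Int)) = true := by simp; omega
      rw [hbeq]
      push_cast
      simp
      ring
    · have hgd : (c.set p.toNat (c.getD p.toNat 0 + 1)).getD i 0 = c.getD i 0 := by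
        by_cases hil : i < c.length
        · rw [List.getD_eq_getElem _ _ (by simpa using hil),
            List.getD_eq_getElem _ _ hil]
          rw [List.getElem_set_ne (by omega)]
        · rw [List.getD_eq_default _ _ (by simpa using (not_lt.mp hil)),
            List.getD_eq_default _ _ (by simpa using (not_lt.mp hil))]
      rw [hgd, List.count_cons]
      have : (p == (i : Int)) = false := by simp; omega
      rw [this]
      simp

-- outer scatter loop: elementwise sum of contributions
theorem pv_scatter_outer (idx : PySem.Dict Int (List Int)) (n : Nat)
    (hb : ∀ v, ∀ p ∈ idx.getD v [], 0 ≤ p ∧ p < (n : Int)) (cta : List Int) :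
    ∀ (c : List Int), c.length = n →
    (cta.foldl (fun c v =>
        if v ≠ 0 ∧ idx.contains v then
          (idx.getD v []).foldl (fun c p =>
            PySem.List.pySetD c p (PySem.List.pyGetD c p 0 + 1)) c
        else c) c).length = n
    ∧ ∀ i : Nat,
      (cta.foldl (fun c v =>
        if v ≠ 0 ∧ idx.contains v then
          (idx.getD v []).foldl (fun c p =>
            PySem.List.pySetD c p (PySem.List.pyGetD c p 0 + 1)) c
        else c) c).getD i 0
      = c.getD i 0 +
        ((cta.map (fun v => if v ≠ 0 then (((idx.getD v []).count (i : Int) : Nat) : Int) else 0)).sum) := by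
  induction cta with
  | nil => intro c hc; simp [hc]
  | cons v vs ih =>
    intro c hc
    simp only [List.foldl_cons, List.map_cons, List.sum_cons]
    by_cases hv : v ≠ 0 ∧ idx.contains v
    · obtain ⟨hlen1, hget1⟩ := pv_scatter_inner (idx.getD v []) c (fun p hp => by
        have := hb v p hp; omega)
      rw [if_pos hv]
      obtain ⟨ihl, ihg⟩ := ih _ (by rw [hlen1, hc])
      refine ⟨ihl, ?_⟩
      intro i
      rw [ihg i, hget1 i, if_pos hv.1]
      ring
    · rw [if_neg hv]
      obtain ⟨ihl, ihg⟩ := ih _ hc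
      refine ⟨ihl, ?_⟩
      intro i
      rw [ihg i]
      by_cases hv0 : v = 0
      · simp [hv0]
      · have hcon : idx.contains v = false := by
          by_contra h
          exact hv ⟨hv0, by simpa using h⟩
        have hnone : idx.get? v = none := by
          rw [PySem.Dict.get?_eq_none_iff_contains, hcon]
        have hget : idx.getD v [] = [] := by
          simp [PySem.Dict.getD, hnone]
        rw [if_pos hv0, hget]
        simp

-- B computes A's characterised result
theorem pv_final (cta ta : List Int) :
    (List.range (ta.length - 1)).map (pvG cta ta) ++ [0]
    = count_every_timestep_alt cta ta := by
  unfold count_every_timestep_alt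
  simp only [PySem.List.slice_to_neg_one]
  set dl := ta.dropLast with hdl
  set idx := (PySem.List.enumerate dl).foldl
    (fun d pt => d.modify pt.2 ([] : List Int) (· ++ [pt.1])) PySem.Dict.empty with hidxdef
  have hdlen : dl.length = ta.length - 1 := List.length_dropLast
  have hcnt : ∀ v (i : Int), (idx.getD v []).count i
      = if 0 ≤ i ∧ i < dl.length ∧ dl.getD i.toNat 0 = v then 1 else 0 := by
    intro v i
    rw [hidxdef, pv_index_getD dl v]
    simpa using pv_enum_count v dl 0 i
  have hb : ∀ v, ∀ p ∈ idx.getD v [], 0 ≤ p ∧ p < ((max ta.length 1 : Nat) : Int) := by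
    intro v p hp
    have hpos := List.count_pos_iff.mpr hp
    rw [hcnt v p] at hpos
    split_ifs at hpos with h
    · have h2 := h.2.1
      constructor
      · exact h.1
      · push_cast at h2 ⊢
        omega
    · omega
  obtain ⟨hL, hG⟩ := pv_scatter_outer idx (max ta.length 1) hb cta
      (List.replicate (max ta.length 1) 0) (by simp)
  apply List.ext_getElem
  · rw [hL]
    simp
    omega
  · intro i h1 h2
    rw [← List.getD_eq_getElem _ 0 h1, ← List.getD_eq_getElem _ 0 h2, hG i]
    have hrep : (List.replicate (max ta.length 1) (0:Int)).getD i 0 = 0 := by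
      by_cases h : i < max ta.length 1
      · rw [List.getD_eq_getElem _ _ (by simpa using h)]
        simp
      · rw [List.getD_eq_default _ _ (by simpa using (not_lt.mp h))]
    rw [hrep, zero_add]
    have hm : i < ta.length - 1 + 1 := by simpa using h1
    have hfun : (fun v => if v ≠ 0 then (((idx.getD v []).count (i : Int) : Nat) : Int) else 0)
        = (fun v => if (decide (v ≠ 0) && (decide ((i:Int) < dl.length) && decide (dl.getD i 0 = v))) = true
            then (1:Int) else 0) := by
      funext v
      by_cases hv : v = 0
      · simp [hv]
      · rw [if_pos hv, hcnt v i]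
        have htn : ((i:Nat) : Int).toNat = i := by omega
        rw [htn]
        by_cases hc : (i:Int) < dl.length ∧ dl.getD i 0 = v
        · rw [if_pos ⟨by omega, hc.1, hc.2⟩, if_pos]
          · simp
          · simp only [Bool.and_eq_true, decide_eq_true_eq]
            exact ⟨hv, hc.1, hc.2⟩
        · rw [if_neg (fun h => hc ⟨h.2.1, h.2.2⟩)]
          push_cast
          rw [if_neg]
          simp only [Bool.and_eq_true, decide_eq_true_eq, not_and]
          intro _ h1' h2'
          exact hc ⟨h1', h2'⟩
    rw [hfun, PySem.List.sum_map_ite_one_zero]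
    by_cases hi : i < ta.length - 1
    · have hidl : (i : Int) < dl.length := by rw [hdlen]; omega
      have hAi : ((List.range (ta.length - 1)).map (pvG cta ta) ++ [0]).getD i 0 = pvG cta ta i := by
        rw [List.getD_eq_getElem _ _ h1, List.getElem_append_left (by simpa using hi)]
        simp
      rw [hAi]
      have hdta : dl.getD i 0 = ta.getD i 0 := by
        have hidl' : i < dl.length := by rw [hdlen]; omega
        rw [List.getD_eq_getElem _ _ hidl', List.getD_eq_getElem _ _ (by rw [hdlen] at hidl'; omega : i < ta.length)]
        exact List.getElem_dropLast hidl'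
      have hcongr : cta.countP (fun v => decide (v ≠ 0) && (decide ((i:Int) < dl.length) && decide (dl.getD i 0 = v)))
          = cta.countP (fun v => decide (ta.getD i 0 = v ∧ v ≠ 0)) := by
        apply List.countP_congr
        intro v hv
        rw [hdta]
        simp [hidl]
        tauto
      rw [hcongr, pv_countP_pvG]
      unfold pvG
      rfl
    · have hAi : ((List.range (ta.length - 1)).map (pvG cta ta) ++ [0]).getD i 0 = 0 := by
        rw [List.getD_eq_getElem _ _ h1]
        rw [List.getElem_append_right (by simp; omega)]
        simp
      rw [hAi]
      have : cta.countP (fun v => decide (v ≠ 0) && (decide ((i:Int) < dl.length) && decide (dl.getD i 0 = v))) = 0 := by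
        rw [List.countP_eq_zero]
        intro v hv
        simp only [Bool.and_eq_true, decide_eq_true_eq, not_and]
        intro _ hlt
        rw [hdlen] at hlt
        omega
      rw [this]
      simp

-- ===== VERDICT (by name: the statement is the Claim_ definition above) =====
theorem count_every_timestep_spec : Claim_equal_count_every_timestep := by
  intro cta ta _
  unfold Spec_count_every_timestep count_every_timestep
  rw [pv_outer]
  exact pv_final cta ta
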